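-- pv_equiv track=rewrite | github.com/khangbkk23/PaperWriterAssistance_VLM | scripts/01_data_preprocessing.py | bucket_histogram
-- ===== SOURCE A (Python) =====
-- def bucket_histogram(lengths):
--     buckets = {"0-128": 0, "129-256": 0, "257-512": 0,
--                "513-768": 0, "769-1024": 0, ">1024": 0}
--     for l in lengths:
--         if   l <= 128:  buckets["0-128"]    += 1
--         elif l <= 256:  buckets["129-256"]  += 1
--         elif l <= 512:  buckets["257-512"]  += 1
--         elif l <= 768:  buckets["513-768"]  += 1
--         elif l <= 1024: buckets["769-1024"] += 1
--         else:           buckets[">1024"]    += 1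
--     return buckets
-- ===== SOURCE B (Python) =====
-- def bucket_histogram(lengths):
--     bounds = [128, 256, 512, 768, 1024]
--     labels = ["0-128", "129-256", "257-512", "513-768", "769-1024", ">1024"]
--     # staged passes: cumulative count of elements <= each boundary, then adjacent differences
--     cum = [sum(1 for l in lengths if l <= b) for b in bounds]
--     cum.append(len(lengths))
--     return {lab: hi - lo for lab, lo, hi in zip(labels, [0] + cum[:-1], cum)}
-- ===== Notes on version B (the rewrite author's own statement) =====
-- stated objective: alternative
-- what changed: Instead of classifying each element in a single pass with an if/elif cascade, B loops over the five boundaries, counts in a separate pass how many elements are <= each boundary (cumulative counts), appends the total length, and obtains each bucket as the difference of adjacent cumulative counts.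
import Mathlib
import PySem

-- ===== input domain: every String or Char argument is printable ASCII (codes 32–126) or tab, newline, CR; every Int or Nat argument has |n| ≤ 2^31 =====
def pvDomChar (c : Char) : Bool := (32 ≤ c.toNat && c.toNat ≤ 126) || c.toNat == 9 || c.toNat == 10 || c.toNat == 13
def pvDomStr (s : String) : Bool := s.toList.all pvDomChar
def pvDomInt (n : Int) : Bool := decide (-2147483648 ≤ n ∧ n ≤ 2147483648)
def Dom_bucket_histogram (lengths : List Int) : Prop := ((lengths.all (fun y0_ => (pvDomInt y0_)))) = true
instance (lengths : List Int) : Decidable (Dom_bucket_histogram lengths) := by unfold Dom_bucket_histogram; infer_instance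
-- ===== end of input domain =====

-- B replaces A's single-pass if/elif classification by staged passes: one counting pass
-- per boundary (cumulative counts of elements <= boundary) plus the total length, the
-- buckets being the adjacent differences (objective: alternative decomposition, not faster).


-- ===== PORT A =====
-- loop body of A's for-loop: the if/elif cascade incrementing one dict entry
def pvStepA (d : PySem.Dict String Int) (l : Int) : PySem.Dict String Int :=
  if l ≤ 128 then d.modify "0-128" 0 (· + 1)
  else if l ≤ 256 then d.modify "129-256" 0 (· + 1)
  else if l ≤ 512 then d.modify "257-512" 0 (· + 1)
  else if l ≤ 768 then d.modify "513-768" 0 (· + 1)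
  else if l ≤ 1024 then d.modify "769-1024" 0 (· + 1)
  else d.modify ">1024" 0 (· + 1)

def bucket_histogram (lengths : List Int) : List (String × Int) :=
  let buckets : PySem.Dict String Int := PySem.Dict.ofList
    [("0-128", 0), ("129-256", 0), ("257-512", 0), ("513-768", 0), ("769-1024", 0), (">1024", 0)]
  (lengths.foldl pvStepA buckets).items

-- ===== PORT B =====
def pvBounds : List Int := [128, 256, 512, 768, 1024]
def pvLabels : List String := ["0-128", "129-256", "257-512", "513-768", "769-1024", ">1024"]

-- cum = [sum(1 for l in lengths if l <= b) for b in bounds]; cum.append(len(lengths));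
-- {lab: hi - lo for lab, lo, hi in zip(labels, [0]+cum[:-1], cum)}
def bucket_histogram_alt (lengths : List Int) : List (String × Int) :=
  let cum : List Int :=
    (pvBounds.map (fun b => ((lengths.countP (fun l => decide (l ≤ b))) : Int)))
      ++ [(lengths.length : Int)]
  (pvLabels.zip (((0 : Int) :: cum.dropLast).zip cum)).map
    (fun p => (p.1, p.2.2 - p.2.1))

-- ===== PRECONDITION & SPEC =====
def Spec_bucket_histogram (lengths : List Int) (out : List (String × Int)) : Prop := out = bucket_histogram_alt lengths
instance (lengths : List Int) (out : List (String × Int)) : Decidable (Spec_bucket_histogram lengths out) := by unfold Spec_bucket_histogram; infer_instance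

-- ===== CLAIM (what is proved, stated in full; the proofs are below) =====
def Claim_equal_bucket_histogram : Prop := ∀ (lengths : List Int), Dom_bucket_histogram lengths → Spec_bucket_histogram lengths (bucket_histogram lengths)

-- ===== LEMMAS AND PROOFS =====

-- the six disjoint bucket predicates of A's cascade
def pvQ0 (l : Int) : Bool := decide (l ≤ 128)
def pvQ1 (l : Int) : Bool := decide (128 < l ∧ l ≤ 256)
def pvQ2 (l : Int) : Bool := decide (256 < l ∧ l ≤ 512)
def pvQ3 (l : Int) : Bool := decide (512 < l ∧ l ≤ 768)
def pvQ4 (l : Int) : Bool := decide (768 < l ∧ l ≤ 1024)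
def pvQ5 (l : Int) : Bool := decide (1024 < l)

-- loop invariant: A's dict stays the labels zipped with the running per-bucket counts
lemma pvLoopA (ls : List Int) : ∀ (c0 c1 c2 c3 c4 c5 : Int),
    (ls.foldl pvStepA (PySem.Dict.mk [("0-128", c0), ("129-256", c1), ("257-512", c2),
        ("513-768", c3), ("769-1024", c4), (">1024", c5)])).items
      = pvLabels.zip [c0 + ls.countP pvQ0, c1 + ls.countP pvQ1, c2 + ls.countP pvQ2,
                      c3 + ls.countP pvQ3, c4 + ls.countP pvQ4, c5 + ls.countP pvQ5] := by
  induction ls with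
  | nil => intro c0 c1 c2 c3 c4 c5; simp [pvLabels]
  | cons l ls ih =>
    intro c0 c1 c2 c3 c4 c5
    by_cases h1 : l ≤ 128
    · have := ih (c0+1) c1 c2 c3 c4 c5
      simp only [List.foldl_cons, pvStepA, h1,  PySem.Dict.modify, PySem.Dict.insert,
        PySem.Dict.getD, PySem.Dict.get?, PySem.Dict.contains] at this ⊢
      simp only [List.countP_cons, pvQ0, pvQ1, pvQ2, pvQ3, pvQ4, pvQ5] at this ⊢
      simp only [
        show decide (l ≤ 128) = true by simp; omega,
        show decide (128 < l ∧ l ≤ 256) = false by simp; omega,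
        show decide (256 < l ∧ l ≤ 512) = false by simp; omega,
        show decide (512 < l ∧ l ≤ 768) = false by simp; omega,
        show decide (768 < l ∧ l ≤ 1024) = false by simp; omega,
        show decide (1024 < l) = false by simp; omega]
      simpa [add_assoc, add_comm, add_left_comm] using this
    by_cases h2 : l ≤ 256
    · have := ih c0 (c1+1) c2 c3 c4 c5
      simp only [List.foldl_cons, pvStepA, h1, h2,  PySem.Dict.modify, PySem.Dict.insert,
        PySem.Dict.getD, PySem.Dict.get?, PySem.Dict.contains] at this ⊢
      simp only [List.countP_cons, pvQ0, pvQ1, pvQ2, pvQ3, pvQ4, pvQ5] at this ⊢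
      simp only [
        show decide (l ≤ 128) = false by simp; omega,
        show decide (128 < l ∧ l ≤ 256) = true by simp; omega,
        show decide (256 < l ∧ l ≤ 512) = false by simp; omega,
        show decide (512 < l ∧ l ≤ 768) = false by simp; omega,
        show decide (768 < l ∧ l ≤ 1024) = false by simp; omega,
        show decide (1024 < l) = false by simp; omega]
      simpa [add_assoc, add_comm, add_left_comm] using this
    by_cases h3 : l ≤ 512
    · have := ih c0 c1 (c2+1) c3 c4 c5
      simp only [List.foldl_cons, pvStepA, h1, h2, h3,  PySem.Dict.modify, PySem.Dict.insert,
        PySem.Dict.getD, PySem.Dict.get?, PySem.Dict.contains] at this ⊢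
      simp only [List.countP_cons, pvQ0, pvQ1, pvQ2, pvQ3, pvQ4, pvQ5] at this ⊢
      simp only [
        show decide (l ≤ 128) = false by simp; omega,
        show decide (128 < l ∧ l ≤ 256) = false by simp; omega,
        show decide (256 < l ∧ l ≤ 512) = true by simp; omega,
        show decide (512 < l ∧ l ≤ 768) = false by simp; omega,
        show decide (768 < l ∧ l ≤ 1024) = false by simp; omega,
        show decide (1024 < l) = false by simp; omega]
      simpa [add_assoc, add_comm, add_left_comm] using this
    by_cases h4 : l ≤ 768
    · have := ih c0 c1 c2 (c3+1) c4 c5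
      simp only [List.foldl_cons, pvStepA, h1, h2, h3, h4,  PySem.Dict.modify, PySem.Dict.insert,
        PySem.Dict.getD, PySem.Dict.get?, PySem.Dict.contains] at this ⊢
      simp only [List.countP_cons, pvQ0, pvQ1, pvQ2, pvQ3, pvQ4, pvQ5] at this ⊢
      simp only [
        show decide (l ≤ 128) = false by simp; omega,
        show decide (128 < l ∧ l ≤ 256) = false by simp; omega,
        show decide (256 < l ∧ l ≤ 512) = false by simp; omega,
        show decide (512 < l ∧ l ≤ 768) = true by simp; omega,
        show decide (768 < l ∧ l ≤ 1024) = false by simp; omega,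
        show decide (1024 < l) = false by simp; omega]
      simpa [add_assoc, add_comm, add_left_comm] using this
    by_cases h5 : l ≤ 1024
    · have := ih c0 c1 c2 c3 (c4+1) c5
      simp only [List.foldl_cons, pvStepA, h1, h2, h3, h4, h5,  PySem.Dict.modify, PySem.Dict.insert,
        PySem.Dict.getD, PySem.Dict.get?, PySem.Dict.contains] at this ⊢
      simp only [List.countP_cons, pvQ0, pvQ1, pvQ2, pvQ3, pvQ4, pvQ5] at this ⊢
      simp only [
        show decide (l ≤ 128) = false by simp; omega,
        show decide (128 < l ∧ l ≤ 256) = false by simp; omega,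
        show decide (256 < l ∧ l ≤ 512) = false by simp; omega,
        show decide (512 < l ∧ l ≤ 768) = false by simp; omega,
        show decide (768 < l ∧ l ≤ 1024) = true by simp; omega,
        show decide (1024 < l) = false by simp; omega]
      simpa [add_assoc, add_comm, add_left_comm] using this
    · have := ih c0 c1 c2 c3 c4 (c5+1)
      simp only [List.foldl_cons, pvStepA, h1, h2, h3, h4, h5,  PySem.Dict.modify, PySem.Dict.insert,
        PySem.Dict.getD, PySem.Dict.get?, PySem.Dict.contains] at this ⊢
      simp only [List.countP_cons, pvQ0, pvQ1, pvQ2, pvQ3, pvQ4, pvQ5] at this ⊢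
      simp only [
        show decide (l ≤ 128) = false by simp; omega,
        show decide (128 < l ∧ l ≤ 256) = false by simp; omega,
        show decide (256 < l ∧ l ≤ 512) = false by simp; omega,
        show decide (512 < l ∧ l ≤ 768) = false by simp; omega,
        show decide (768 < l ∧ l ≤ 1024) = false by simp; omega,
        show decide (1024 < l) = true by simp; omega]
      simpa [add_assoc, add_comm, add_left_comm] using this

-- cumulative counts of B are the partial sums of A's bucket counts
lemma pvCum (ls : List Int) :
    ls.countP (fun l => decide (l ≤ 128)) = ls.countP pvQ0 ∧
    ls.countP (fun l => decide (l ≤ 256)) = ls.countP pvQ0 + ls.countP pvQ1 ∧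
    ls.countP (fun l => decide (l ≤ 512)) = ls.countP pvQ0 + ls.countP pvQ1 + ls.countP pvQ2 ∧
    ls.countP (fun l => decide (l ≤ 768)) = ls.countP pvQ0 + ls.countP pvQ1 + ls.countP pvQ2 + ls.countP pvQ3 ∧
    ls.countP (fun l => decide (l ≤ 1024)) = ls.countP pvQ0 + ls.countP pvQ1 + ls.countP pvQ2 + ls.countP pvQ3 + ls.countP pvQ4 ∧
    ls.length = ls.countP pvQ0 + ls.countP pvQ1 + ls.countP pvQ2 + ls.countP pvQ3 + ls.countP pvQ4 + ls.countP pvQ5 := by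
  induction ls with
  | nil => simp
  | cons l ls ih =>
    obtain ⟨i1, i2, i3, i4, i5, i6⟩ := ih
    simp only [List.countP_cons, List.length_cons, pvQ0, pvQ1, pvQ2, pvQ3, pvQ4, pvQ5] at *
    by_cases h1 : l ≤ 128
    · simp only [
        show decide (l ≤ 256) = true by simp; omega,
        show decide (l ≤ 512) = true by simp; omega,
        show decide (l ≤ 768) = true by simp; omega,
        show decide (l ≤ 1024) = true by simp; omega,
        show decide (l ≤ 128) = true by simp; omega,
        show decide (128 < l ∧ l ≤ 256) = false by simp; omega,
        show decide (256 < l ∧ l ≤ 512) = false by simp; omega,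
        show decide (512 < l ∧ l ≤ 768) = false by simp; omega,
        show decide (768 < l ∧ l ≤ 1024) = false by simp; omega,
        show decide (1024 < l) = false by simp; omega]
      simp only [if_true, Bool.false_eq_true, if_false]
      omega
    by_cases h2 : l ≤ 256
    · simp only [
        show decide (l ≤ 128) = false by simp; omega,
        show decide (l ≤ 256) = true by simp; omega,
        show decide (l ≤ 512) = true by simp; omega,
        show decide (l ≤ 768) = true by simp; omega,
        show decide (l ≤ 1024) = true by simp; omega,
        show decide (128 < l ∧ l ≤ 256) = true by simp; omega,
        show decide (256 < l ∧ l ≤ 512) = false by simp; omega,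
        show decide (512 < l ∧ l ≤ 768) = false by simp; omega,
        show decide (768 < l ∧ l ≤ 1024) = false by simp; omega,
        show decide (1024 < l) = false by simp; omega]
      simp only [if_true, Bool.false_eq_true, if_false]
      omega
    by_cases h3 : l ≤ 512
    · simp only [
        show decide (l ≤ 128) = false by simp; omega,
        show decide (l ≤ 256) = false by simp; omega,
        show decide (l ≤ 512) = true by simp; omega,
        show decide (l ≤ 768) = true by simp; omega,
        show decide (l ≤ 1024) = true by simp; omega,
        show decide (128 < l ∧ l ≤ 256) = false by simp; omega,
        show decide (256 < l ∧ l ≤ 512) = true by simp; omega,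
        show decide (512 < l ∧ l ≤ 768) = false by simp; omega,
        show decide (768 < l ∧ l ≤ 1024) = false by simp; omega,
        show decide (1024 < l) = false by simp; omega]
      simp only [if_true, Bool.false_eq_true, if_false]
      omega
    by_cases h4 : l ≤ 768
    · simp only [
        show decide (l ≤ 128) = false by simp; omega,
        show decide (l ≤ 256) = false by simp; omega,
        show decide (l ≤ 512) = false by simp; omega,
        show decide (l ≤ 768) = true by simp; omega,
        show decide (l ≤ 1024) = true by simp; omega,
        show decide (128 < l ∧ l ≤ 256) = false by simp; omega,
        show decide (256 < l ∧ l ≤ 512) = false by simp; omega,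
        show decide (512 < l ∧ l ≤ 768) = true by simp; omega,
        show decide (768 < l ∧ l ≤ 1024) = false by simp; omega,
        show decide (1024 < l) = false by simp; omega]
      simp only [if_true, Bool.false_eq_true, if_false]
      omega
    by_cases h5 : l ≤ 1024
    · simp only [
        show decide (l ≤ 128) = false by simp; omega,
        show decide (l ≤ 256) = false by simp; omega,
        show decide (l ≤ 512) = false by simp; omega,
        show decide (l ≤ 768) = false by simp; omega,
        show decide (l ≤ 1024) = true by simp; omega,
        show decide (128 < l ∧ l ≤ 256) = false by simp; omega,
        show decide (256 < l ∧ l ≤ 512) = false by simp; omega,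
        show decide (512 < l ∧ l ≤ 768) = false by simp; omega,
        show decide (768 < l ∧ l ≤ 1024) = true by simp; omega,
        show decide (1024 < l) = false by simp; omega]
      simp only [if_true, Bool.false_eq_true, if_false]
      omega
    · simp only [
        show decide (l ≤ 128) = false by simp; omega,
        show decide (l ≤ 256) = false by simp; omega,
        show decide (l ≤ 512) = false by simp; omega,
        show decide (l ≤ 768) = false by simp; omega,
        show decide (l ≤ 1024) = false by simp; omega,
        show decide (128 < l ∧ l ≤ 256) = false by simp; omega,
        show decide (256 < l ∧ l ≤ 512) = false by simp; omega,
        show decide (512 < l ∧ l ≤ 768) = false by simp; omega,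
        show decide (768 < l ∧ l ≤ 1024) = false by simp; omega,
        show decide (1024 < l) = true by simp; omega]
      simp only [if_true, Bool.false_eq_true, if_false]
      omega

-- ===== VERDICT (by name: the statement is the Claim_ definition above) =====
theorem bucket_histogram_spec : Claim_equal_bucket_histogram := by
  intro lengths _
  show bucket_histogram lengths = bucket_histogram_alt lengths
  have hinit : PySem.Dict.ofList
      [("0-128", (0:Int)), ("129-256", 0), ("257-512", 0), ("513-768", 0), ("769-1024", 0), (">1024", 0)]
      = PySem.Dict.mk [("0-128", 0), ("129-256", 0), ("257-512", 0), ("513-768", 0), ("769-1024", 0), (">1024", 0)] := by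
    decide
  obtain ⟨e1, e2, e3, e4, e5, e6⟩ := pvCum lengths
  unfold bucket_histogram bucket_histogram_alt
  rw [hinit, pvLoopA lengths 0 0 0 0 0 0]
  simp only [pvBounds, pvLabels, List.map_cons, List.cons_append, List.nil_append,
    List.dropLast, List.map, List.zip]
  rw [e1, e2, e3, e4, e5, e6]
  simp [List.zipWith]
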